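-- pv_equiv track=rewrite | github.com/cabaleirog/coding-challenges | hacker_rank/validating_postalcode.py | alternating_repetitive_digits
-- ===== SOURCE A (Python) =====
-- def alternating_repetitive_digits(code):
--     """Count the number of times the code has alternating repetitive digits.
--
--     Args:
--         code (str): the code to verify
--
--     Returns:
--         int: total number of alternating repetitive digits
--     """
--     count = 0
--     enum_codes = list(enumerate([x for x in code]))
--     evens = list(filter(lambda x: x[0] % 2 == 0, enum_codes))
--     odds = list(filter(lambda x: x[0] % 2 != 0, enum_codes))
--     for group in [evens, odds]:
--         group_zip = zip(group[:-1], group[1:])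
--         count += len(list(filter(lambda x: x[1][1] == x[0][1], group_zip)))
--     return count
-- ===== SOURCE B (Python) =====
-- def alternating_repetitive_digits(code):
--     """Count the number of times the code has alternating repetitive digits.
--
--     Args:
--         code (str): the code to verify
--
--     Returns:
--         int: total number of alternating repetitive digits
--     """
--     count = 0
--     for i in range(len(code) - 2):
--         if code[i] == code[i + 2]:
--             count += 1
--     return count
-- ===== Notes on version B (the rewrite author's own statement) =====
-- stated objective: simpler
-- what changed: B replaces A's enumerate/parity-partition into even- and odd-index lists, slicing and zipping each group and counting equal neighbours, by one direct index pass comparing code[i] with code[i+2]; no intermediate lists are built, which also makes it measurably faster by a constant factor.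
import Mathlib
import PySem

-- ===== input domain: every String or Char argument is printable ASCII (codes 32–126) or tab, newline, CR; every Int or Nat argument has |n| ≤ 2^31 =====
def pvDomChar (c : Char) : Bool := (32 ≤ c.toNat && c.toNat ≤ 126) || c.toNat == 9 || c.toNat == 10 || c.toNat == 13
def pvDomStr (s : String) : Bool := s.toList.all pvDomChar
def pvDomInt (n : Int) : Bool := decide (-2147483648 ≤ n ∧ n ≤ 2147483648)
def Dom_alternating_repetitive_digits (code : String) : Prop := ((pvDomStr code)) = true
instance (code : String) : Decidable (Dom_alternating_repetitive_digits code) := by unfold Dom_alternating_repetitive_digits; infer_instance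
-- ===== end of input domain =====

-- B does one direct index pass comparing code[i] with code[i+2], instead of A's parity partition of
-- enumerated characters into even/odd groups zipped with themselves; objective: simpler.

-- ===== PORT A =====
def alternating_repetitive_digits (code : String) : Int :=
  let count : Int := 0
  let enum_codes := PySem.List.enumerate code.toList
  let evens := enum_codes.filter (fun x => PySem.Int.mod x.1 2 == 0)
  let odds := enum_codes.filter (fun x => PySem.Int.mod x.1 2 != 0)
  [evens, odds].foldl (fun count group =>
    let group_zip := List.zip (PySem.List.slice group none (some (-1)))
                              (PySem.List.slice group (some 1) none)
    count + ((group_zip.filter (fun x => x.2.2 == x.1.2)).length : Int)) count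

-- ===== PORT B =====
def alternating_repetitive_digits_alt (code : String) : Int :=
  (PySem.List.pyRange 0 ((PySem.Str.len code : Int) - 2) 1).foldl
    (fun count i =>
      if PySem.Str.pyGet? code i == PySem.Str.pyGet? code (i + 2) then count + 1 else count) 0

-- ===== PRECONDITION & SPEC =====
def Spec_alternating_repetitive_digits (code : String) (out : Int) : Prop := out = alternating_repetitive_digits_alt code
instance (code : String) (out : Int) : Decidable (Spec_alternating_repetitive_digits code out) := by unfold Spec_alternating_repetitive_digits; infer_instance

-- ===== CLAIM (what is proved, stated in full; the proofs are below) =====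
def Claim_equal_alternating_repetitive_digits : Prop := ∀ (code : String), Dom_alternating_repetitive_digits code → Spec_alternating_repetitive_digits code (alternating_repetitive_digits code)

-- ===== LEMMAS AND PROOFS =====

-- elements of l at even positions
def pvEv : List Char → List Char
  | [] => []
  | [a] => [a]
  | a :: _ :: t => a :: pvEv t

-- number of adjacent equal pairs
def pvCA : List Char → Nat
  | a :: b :: t => (if a = b then 1 else 0) + pvCA (b :: t)
  | _ => 0

-- number of positions i with l[i] = l[i+2]
def pvG : List Char → Nat
  | a :: b :: c :: t => (if a = c then 1 else 0) + pvG (b :: c :: t)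
  | _ => 0

theorem pvEv_cons (a : Char) (t : List Char) : pvEv (a :: t) = a :: pvEv t.tail := by
  cases t <;> simp [pvEv]

theorem zip_filter_len (g : List (Int × Char)) :
    ((List.zip g.dropLast g.tail).filter (fun x => x.2.2 == x.1.2)).length
      = pvCA (g.map Prod.snd) := by
  match g with
  | [] => rfl
  | [x] => rfl
  | x :: y :: t =>
      have ih := zip_filter_len (y :: t)
      simp only [List.dropLast_cons₂, List.tail_cons, List.zip_cons_cons, List.filter_cons,
        List.map_cons, pvCA] at *
      by_cases h : x.2 = y.2
      · simp [h, ih, Nat.add_comm]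
      · have hb : (y.2 == x.2) = false := by
          simp only [beq_eq_false_iff_ne, ne_eq]
          exact fun e => h e.symm
        simp [hb, h, ih]

theorem enum_filter (l : List Char) (s : Int) :
    (((PySem.List.enumerate l s).filter (fun x => x.1 % 2 == 0)).map Prod.snd,
     ((PySem.List.enumerate l s).filter (fun x => x.1 % 2 != 0)).map Prod.snd)
      = if s % 2 = 0 then (pvEv l, pvEv l.tail) else (pvEv l.tail, pvEv l) := by
  induction l generalizing s with
  | nil => by_cases h : s % 2 = 0 <;> simp [PySem.List.enumerate_nil, h, pvEv]
  | cons a t ih =>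
      have ih' := ih (s + 1)
      rw [PySem.List.enumerate_cons]
      by_cases h : s % 2 = 0
      · have h1 : ¬ (s + 1) % 2 = 0 := by omega
        rw [if_neg h1] at ih'
        have e1 := congrArg Prod.fst ih'
        have e2 := congrArg Prod.snd ih'
        simp only at e1 e2
        simp [h, e1, e2, pvEv_cons]
      · have h1 : (s + 1) % 2 = 0 := by omega
        rw [if_pos h1] at ih'
        have e1 := congrArg Prod.fst ih'
        have e2 := congrArg Prod.snd ih'
        simp only at e1 e2
        simp [h, e1, e2, pvEv_cons]

theorem ca_ev_sum (l : List Char) : pvCA (pvEv l) + pvCA (pvEv l.tail) = pvG l := by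
  match l with
  | [] => rfl
  | [a] => rfl
  | [a, b] => rfl
  | a :: b :: c :: t =>
      have ih := ca_ev_sum (b :: c :: t)
      simp only [List.tail_cons] at *
      have e : pvCA (pvEv (a :: b :: c :: t)) = (if a = c then 1 else 0) + pvCA (pvEv (c :: t)) := by
        show pvCA (a :: pvEv (c :: t)) = _
        rw [pvEv_cons c]
        rfl
      have h2 : pvG (a :: b :: c :: t) = (if a = c then 1 else 0) + pvG (b :: c :: t) := rfl
      rw [e, h2, ← ih]
      omega

theorem countP_G (l : List Char) :
    (List.range (l.length - 2)).countP (fun k => l[k]? == l[k + 2]?) = pvG l := by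
  match l with
  | [] => rfl
  | [a] => rfl
  | [a, b] => rfl
  | a :: b :: c :: t =>
      have ih := countP_G (b :: c :: t)
      have hlen : (a :: b :: c :: t).length - 2 = ((b :: c :: t).length - 2) + 1 := by
        simp only [List.length_cons]; omega
      rw [hlen, List.range_succ_eq_map, List.countP_cons, List.countP_map]
      have hz : ((a :: b :: c :: t)[(0:Nat)]? == (a :: b :: c :: t)[0 + 2]?) = (a == c) := rfl
      have hc : List.countP ((fun k => (a :: b :: c :: t)[k]? == (a :: b :: c :: t)[k + 2]?) ∘ Nat.succ)
            (List.range ((b :: c :: t).length - 2))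
          = List.countP (fun k => (b :: c :: t)[k]? == (b :: c :: t)[k + 2]?)
            (List.range ((b :: c :: t).length - 2)) := by
        apply List.countP_congr
        intro k _
        rfl
      rw [hz, hc, ih]
      simp only [pvG]
      by_cases h : a = c <;> simp [h, Nat.add_comm]

-- ===== VERDICT (by name: the statement is the Claim_ definition above) =====
theorem alternating_repetitive_digits_spec : Claim_equal_alternating_repetitive_digits := by
  intro code _
  unfold Spec_alternating_repetitive_digits alternating_repetitive_digits alternating_repetitive_digits_alt
  simp only [List.foldl_cons, List.foldl_nil, PySem.List.slice_to_neg_one, PySem.List.slice_from_one]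
  -- A's parity predicates use PySem.Int.mod; with nonneg indices it is emod
  have hev : (fun (x : Int × Char) => PySem.Int.mod x.1 2 == 0) = fun x => x.1 % 2 == 0 := by
    funext x; rw [PySem.Int.mod_eq_emod_of_pos (by omega)]
  have hod : (fun (x : Int × Char) => PySem.Int.mod x.1 2 != 0) = fun x => x.1 % 2 != 0 := by
    funext x; rw [PySem.Int.mod_eq_emod_of_pos (by omega)]
  rw [hev, hod, zip_filter_len, zip_filter_len]
  have hef := enum_filter code.toList 0
  rw [if_pos (by decide)] at hef
  have e1 := congrArg Prod.fst hef
  have e2 := congrArg Prod.snd hef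
  simp only at e1 e2
  rw [e1, e2]
  -- B's side
  rw [PySem.List.foldl_if_add_one, PySem.List.pyRange_one, List.countP_map]
  have hcp : List.countP
        ((fun i => PySem.Str.pyGet? code i == PySem.Str.pyGet? code (i + 2)) ∘ fun k : Nat => (0 : Int) + ↑k)
        (List.range (((PySem.Str.len code : Int) - 2 - 0).toNat))
      = List.countP (fun k => code.toList[k]? == code.toList[k + 2]?)
        (List.range (code.toList.length - 2)) := by
    have hn : (((PySem.Str.len code : Int) - 2 - 0).toNat) = code.toList.length - 2 := by
      rw [PySem.Str.len_eq]; omega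
    rw [hn]
    apply List.countP_congr
    intro k _
    simp only [Function.comp, zero_add]
    have h2 : PySem.Str.pyGet? code ((k : Int) + 2) = code.toList[k + 2]? := by
      rw [show ((k : Int) + 2) = ((k + 2 : Nat) : Int) by push_cast; ring]
      simp only [PySem.Str.pyGet?_natCast]
    rw [h2]
    simp only [PySem.Str.pyGet?_natCast]
  rw [hcp, countP_G]
  have := ca_ev_sum code.toList
  omega
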